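-- pv_equiv track=rewrite | github.com/pedro456tv/cs50AI | tictactoe/tictactoe/tictactoe.py | player
-- ===== SOURCE A (Python) =====
-- X = "X"
--
-- O = "O"
--
-- EMPTY = None
--
-- def initial_state():
--     """
--     Returns starting state of the board.
--     """
--     return [[EMPTY, EMPTY, EMPTY],
--             [EMPTY, EMPTY, EMPTY],
--             [EMPTY, EMPTY, EMPTY]]
--
-- def player(board):
--     """
--     Returns player who has the next turn on a board.
--     """
--     if(board == initial_state()):
--         return X
--     x_sum = sum([i.count(X) for i in board])
--     o_sum = sum([i.count(O) for i in board])
--     if(x_sum > o_sum):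
--         return O
--     return X
--
--     raise NotImplementedError
-- ===== SOURCE B (Python) =====
-- X = "X"
-- O = "O"
--
-- def player(board):
--     """
--     Returns player who has the next turn on a board.
--     Boyer-Moore majority vote over the marks: keep a candidate mark and a
--     cancellation counter; each opposing mark cancels one vote.  On a
--     two-symbol stream the surviving candidate is the strict-majority mark,
--     so X strictly outnumbers O exactly when the vote ends with candidate X
--     and a positive counter.
--     """
--     candidate, votes = None, 0
--     for row in board:
--         for cell in row:
--             if cell != X and cell != O:
--                 continue
--             if votes == 0:
--                 candidate, votes = cell, 1
--             elif cell == candidate: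
--                 votes += 1
--             else:
--                 votes -= 1
--     return O if votes > 0 and candidate == X else X
-- ===== Notes on version B (the rewrite author's own statement) =====
-- stated objective: alternative
-- what changed: Replaces the initial-state comparison plus two count-and-sum passes by a single Boyer-Moore majority-vote pass (candidate mark + cancellation counter); on a two-symbol stream the vote survives with candidate X and positive counter exactly when X strictly outnumbers O.
import Mathlib
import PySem

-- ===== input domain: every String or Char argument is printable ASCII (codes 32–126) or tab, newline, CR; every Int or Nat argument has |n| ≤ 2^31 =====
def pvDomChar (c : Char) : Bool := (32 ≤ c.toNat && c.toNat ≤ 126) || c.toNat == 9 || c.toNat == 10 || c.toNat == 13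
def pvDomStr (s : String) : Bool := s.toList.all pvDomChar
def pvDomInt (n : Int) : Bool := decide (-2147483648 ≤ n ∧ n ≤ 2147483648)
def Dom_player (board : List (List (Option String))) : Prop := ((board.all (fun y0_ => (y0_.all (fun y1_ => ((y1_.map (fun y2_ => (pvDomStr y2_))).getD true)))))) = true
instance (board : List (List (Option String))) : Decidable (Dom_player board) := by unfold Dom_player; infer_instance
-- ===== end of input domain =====

-- B replaces A's initial-state guard and two count-and-sum passes by one Boyer–Moore majority-vote pass (alternative algorithm); same return value everywhere.

-- ===== PORT A =====
-- initial_state(): the 3x3 board of EMPTY (None)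
def initialState : List (List (Option String)) :=
  [[none, none, none], [none, none, none], [none, none, none]]

def player (board : List (List (Option String))) : String :=
  if board = initialState then "X"
  else
    let x_sum : Int := ((board.map (fun i => (PySem.List.count i (some "X") : Int))).sum)
    let o_sum : Int := ((board.map (fun i => (PySem.List.count i (some "O") : Int))).sum)
    if x_sum > o_sum then "O" else "X"

-- ===== PORT B =====
-- one Boyer–Moore vote step: skip non-marks, adopt on empty counter, else cancel/confirm
def bmStep (st : Option String × Int) (cell : Option String) : Option String × Int :=
  if cell ≠ some "X" ∧ cell ≠ some "O" then st
  else if st.2 = 0 then (cell, 1)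
  else if cell = st.1 then (st.1, st.2 + 1)
  else (st.1, st.2 - 1)

def player_alt (board : List (List (Option String))) : String :=
  let st := board.foldl (fun st row => row.foldl bmStep st) (none, 0)
  if st.2 > 0 ∧ st.1 = some "X" then "O" else "X"

-- ===== PRECONDITION & SPEC =====
def Spec_player (board : List (List (Option String))) (out : String) : Prop := out = player_alt board
instance (board : List (List (Option String))) (out : String) : Decidable (Spec_player board out) := by unfold Spec_player; infer_instance

-- ===== CLAIM (what is proved, stated in full; the proofs are below) =====
def Claim_equal_player : Prop := ∀ (board : List (List (Option String))), Dom_player board → Spec_player board (player board)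

-- ===== LEMMAS AND PROOFS =====

-- vote-state invariant: the counter and candidate encode the sign and size of the X−O balance
def VoteInv (st : Option String × Int) (bal : Int) : Prop :=
  (0 < bal → st = (some "X", bal)) ∧ (bal < 0 → st = (some "O", -bal)) ∧ (bal = 0 → st.2 = 0)

def cellDelta (cell : Option String) : Int :=
  if cell = some "X" then 1 else if cell = some "O" then -1 else 0

theorem bmStep_inv (st : Option String × Int) (bal : Int) (cell : Option String)
    (h : VoteInv st bal) : VoteInv (bmStep st cell) (bal + cellDelta cell) := by
  obtain ⟨hp, hn, hz⟩ := h
  by_cases hx : cell = some "X"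
  · subst hx
    have hdel : cellDelta (some "X") = 1 := by simp [cellDelta]
    rw [hdel]
    rcases lt_trichotomy bal 0 with h0 | h0 | h0
    · rw [hn h0, show bmStep (some "O", -bal) (some "X") = (some "O", -bal - 1) from by
        simp [bmStep, show ¬(-bal = 0) from by omega]]
      exact ⟨fun h1 => absurd h1 (by omega),
             fun h1 => by simp; omega,
             fun h1 => by simp; omega⟩
    · subst h0
      rw [show bmStep st (some "X") = (some "X", 1) from by simp [bmStep, hz rfl]]
      exact ⟨fun _ => rfl, fun h1 => absurd h1 (by omega), fun h1 => absurd h1 (by omega)⟩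
    · rw [hp h0, show bmStep (some "X", bal) (some "X") = (some "X", bal + 1) from by
        simp [bmStep, show ¬(bal = 0) from by omega]]
      exact ⟨fun _ => rfl, fun h1 => absurd h1 (by omega), fun h1 => absurd h1 (by omega)⟩
  · by_cases ho : cell = some "O"
    · subst ho
      have hdel : cellDelta (some "O") = -1 := by simp [cellDelta]
      rw [hdel]
      rcases lt_trichotomy bal 0 with h0 | h0 | h0
      · rw [hn h0, show bmStep (some "O", -bal) (some "O") = (some "O", -bal + 1) from by
          simp [bmStep, show ¬(-bal = 0) from by omega]]
        exact ⟨fun h1 => absurd h1 (by omega),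
               fun h1 => by simp; omega,
               fun h1 => absurd h1 (by omega)⟩
      · subst h0
        rw [show bmStep st (some "O") = (some "O", 1) from by simp [bmStep, hz rfl]]
        exact ⟨fun h1 => absurd h1 (by omega), fun _ => rfl, fun h1 => absurd h1 (by omega)⟩
      · rw [hp h0, show bmStep (some "X", bal) (some "O") = (some "X", bal - 1) from by
          simp [bmStep, show ¬(bal = 0) from by omega]]
        exact ⟨fun h1 => by simp; omega,
               fun h1 => absurd h1 (by omega), fun h1 => by simp; omega⟩
    · have hskip : bmStep st cell = st := by
        simp only [bmStep]; rw [if_pos ⟨hx, ho⟩]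
      have hd : cellDelta cell = 0 := by simp [cellDelta, hx, ho]
      rw [hskip, hd, add_zero]
      exact ⟨hp, hn, hz⟩

-- cons step of the balance for one cell
theorem bal_cons (c : Option String) (t : List (Option String)) (bal : Int) :
    bal + ((c :: t).count (some "X") : Int) - ((c :: t).count (some "O") : Int)
      = (bal + cellDelta c) + (t.count (some "X") : Int) - (t.count (some "O") : Int) := by
  by_cases hx : c = some "X" <;> by_cases ho : c = some "O" <;>
    simp_all [cellDelta] <;> ring

theorem row_inv (row : List (Option String)) (st : Option String × Int) (bal : Int)
    (h : VoteInv st bal) :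
    VoteInv (row.foldl bmStep st)
      (bal + (row.count (some "X") : Int) - (row.count (some "O") : Int)) := by
  induction row generalizing st bal with
  | nil => simpa using h
  | cons c t ih =>
    rw [List.foldl_cons, bal_cons]
    exact ih _ _ (bmStep_inv st bal c h)

-- cons step of the balance for one row
theorem bal_row_cons (r : List (Option String)) (t : List (List (Option String))) (bal : Int) :
    bal + (((r :: t).map (fun i => (i.count (some "X") : Int))).sum)
        - (((r :: t).map (fun i => (i.count (some "O") : Int))).sum)
      = (bal + (r.count (some "X") : Int) - (r.count (some "O") : Int))
          + ((t.map (fun i => (i.count (some "X") : Int))).sum)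
          - ((t.map (fun i => (i.count (some "O") : Int))).sum) := by
  simp only [List.map_cons, List.sum_cons]; ring

theorem board_inv (board : List (List (Option String))) (st : Option String × Int) (bal : Int)
    (h : VoteInv st bal) :
    VoteInv (board.foldl (fun st row => row.foldl bmStep st) st)
      (bal + ((board.map (fun i => (i.count (some "X") : Int))).sum)
           - ((board.map (fun i => (i.count (some "O") : Int))).sum)) := by
  induction board generalizing st bal with
  | nil => simpa using h
  | cons r t ih =>
    rw [List.foldl_cons, bal_row_cons]
    exact ih _ _ (row_inv r st bal h)

-- ===== VERDICT (by name: the statement is the Claim_ definition above) =====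
theorem player_spec : Claim_equal_player := by
  intro board _
  unfold Spec_player player player_alt
  have hinv := board_inv board (none, 0) 0 (by simp [VoteInv])
  simp only [zero_add] at hinv
  set bal : Int := ((board.map (fun i => (i.count (some "X") : Int))).sum)
       - ((board.map (fun i => (i.count (some "O") : Int))).sum) with hbal
  set st := board.foldl (fun st row => row.foldl bmStep st) ((none : Option String), (0 : Int)) with hst
  obtain ⟨hp, hn, hz⟩ := hinv
  simp only [PySem.List.count_eq]
  have hcond : (st.2 > 0 ∧ st.1 = some "X") ↔ 0 < bal := by
    constructor
    · rintro ⟨h1, h2⟩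
      rcases lt_trichotomy bal 0 with h0 | h0 | h0
      · have := hn h0; rw [this] at h2; simp at h2
      · have := hz h0; omega
      · exact h0
    · intro h0; have := hp h0; simp [this, h0]
  by_cases h : board = initialState
  · subst h
    have : bal = 0 := by simp [hbal, initialState]
    simp [show ¬ (st.2 > 0 ∧ st.1 = some "X") by rw [hcond]; omega]
  · simp only [h, if_false]
    by_cases hgt : 0 < bal
    · simp only [hcond, gt_iff_lt]
      rw [if_pos (by omega), if_pos hgt]
    · simp only [hcond, gt_iff_lt]
      rw [if_neg (by omega), if_neg hgt]
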